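-- pv_equiv track=rewrite | github.com/KarAbhishek/MSBIC | BioInformatics/Week3/string_reconstruction.py | attach_with_later_cards
-- ===== SOURCE A (Python) =====
-- def attach_with_later_cards(my_card, all_cards_except_mine, return_list):
--     if len(all_cards_except_mine) == 0:
--         return return_list
--     for matcher_idx, matcher_card in enumerate(all_cards_except_mine):
--         if my_card[-(len(my_card)-1):] == matcher_card[:(len(my_card)-1)]:
--             return_list.append(matcher_card)
--             return attach_with_later_cards(matcher_card, all_cards_except_mine[:matcher_idx] + all_cards_except_mine[
--                                                                                                matcher_idx + 1:],
--                                            return_list)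
--     return []
-- ===== SOURCE B (Python) =====
-- def attach_with_later_cards(my_card, all_cards_except_mine, return_list):
--     cards = all_cards_except_mine
--     n = len(cards)
--     alive = [True] * n
--     remaining = n
--     cur = my_card
--     last_plen = None
--     buckets = {}
--     while remaining > 0:
--         plen = len(cur) - 1
--         if plen != last_plen:
--             buckets = {}
--             for i in range(n):
--                 buckets.setdefault(cards[i][:plen], []).append(i)
--             last_plen = plen
--         found = -1
--         for i in buckets.get(cur[-plen:], []):
--             if alive[i]:
--                 found = i
--                 break
--         if found < 0:
--             return []
--         return_list.append(cards[found])
--         cur = cards[found]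
--         alive[found] = False
--         remaining -= 1
--     return return_list
-- ===== Notes on version B (the rewrite author's own statement) =====
-- stated objective: faster
-- what changed: Instead of re-scanning the shrinking card list on every recursive step, B builds (and caches per prefix-length) a dict from each card's prefix to the ascending list of its indices, keeps an alive mask, and per step looks up the current suffix and takes the earliest alive index in that bucket, looping iteratively.
import Mathlib
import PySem

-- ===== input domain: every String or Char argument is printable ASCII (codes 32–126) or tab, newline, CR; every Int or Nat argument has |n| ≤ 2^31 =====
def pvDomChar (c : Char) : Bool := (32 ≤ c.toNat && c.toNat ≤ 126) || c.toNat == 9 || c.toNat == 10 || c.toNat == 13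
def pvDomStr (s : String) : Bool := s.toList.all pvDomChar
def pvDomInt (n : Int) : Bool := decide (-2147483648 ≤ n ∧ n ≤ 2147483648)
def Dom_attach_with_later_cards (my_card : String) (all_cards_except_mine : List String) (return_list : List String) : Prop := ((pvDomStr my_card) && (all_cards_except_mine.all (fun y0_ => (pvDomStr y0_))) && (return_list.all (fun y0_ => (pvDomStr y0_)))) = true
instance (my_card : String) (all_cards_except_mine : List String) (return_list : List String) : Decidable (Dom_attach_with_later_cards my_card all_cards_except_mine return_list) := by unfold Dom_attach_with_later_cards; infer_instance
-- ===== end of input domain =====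

-- B replaces the per-step rescan of the remaining cards by a prefix->indices dict (built once per
-- prefix length) plus an alive mask; return-value equivalence proved (in Python both A and B also
-- append the chained cards to return_list in place).
-- ===== PORT A =====
-- A recurses on a list that shrinks by one card per step; fuel = length + 1 makes that structural.
def pvGoA : Nat -> String -> List String -> List String -> List String
  | 0, _, _, _ => []
  | fuel + 1, my_card, all_cards_except_mine, return_list =>
    if all_cards_except_mine.length = 0 then return_list
    else
      match (PySem.List.enumerate all_cards_except_mine 0).find? (fun p =>
          PySem.Str.slice my_card (some (-((PySem.Str.len my_card : Int) - 1))) none ==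
          PySem.Str.slice p.2 none (some ((PySem.Str.len my_card : Int) - 1))) with
      | none => []
      | some (matcher_idx, matcher_card) =>
          pvGoA fuel matcher_card
            (PySem.List.slice all_cards_except_mine none (some matcher_idx) ++
             PySem.List.slice all_cards_except_mine (some (matcher_idx + 1)) none)
            (return_list ++ [matcher_card])

def attach_with_later_cards (my_card : String) (all_cards_except_mine : List String) (return_list : List String) : List String :=
  pvGoA (all_cards_except_mine.length + 1) my_card all_cards_except_mine return_list

-- ===== PORT B =====
-- Source B: buckets.setdefault(cards[i][:plen], []).append(i) over i in range(n)  (d[k] = d.get(k, []) + [i])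
def pvBuildBuckets (cards : List String) (plen : Int) : PySem.Dict String (List Nat) :=
  (List.range cards.length).foldl
    (fun d i => d.modify (PySem.Str.slice (cards.getD i "") none (some plen)) [] (fun l => l ++ [i]))
    PySem.Dict.empty

-- the while loop; `remaining` decreases by one per iteration, so it is the structural fuel.
-- indices in buckets are always < cards.length, so cards.getD i "" / alive.getD i false are cards[i] / alive[i].
def pvGoB : Nat -> String -> List String -> List Bool -> Option Int -> PySem.Dict String (List Nat) -> List String -> List String
  | 0, _, _, _, _, _, return_list => return_list
  | remaining + 1, cur, cards, alive, last_plen, buckets0, return_list =>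
    let plen : Int := (PySem.Str.len cur : Int) - 1
    let buckets := if some plen = last_plen then buckets0 else pvBuildBuckets cards plen
    match (buckets.getD (PySem.Str.slice cur (some (-plen)) none) []).find? (fun i => alive.getD i false) with
    | none => []
    | some found =>
        pvGoB remaining (cards.getD found "") cards (alive.set found false) (some plen) buckets
          (return_list ++ [cards.getD found ""])

def attach_with_later_cards_alt (my_card : String) (all_cards_except_mine : List String) (return_list : List String) : List String :=
  pvGoB all_cards_except_mine.length my_card all_cards_except_mine
    (List.replicate all_cards_except_mine.length true) none PySem.Dict.empty return_list

-- ===== PRECONDITION & SPEC =====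
def Spec_attach_with_later_cards (my_card : String) (all_cards_except_mine : List String) (return_list : List String) (out : List String) : Prop := out = attach_with_later_cards_alt my_card all_cards_except_mine return_list
instance (my_card : String) (all_cards_except_mine : List String) (return_list : List String) (out : List String) : Decidable (Spec_attach_with_later_cards my_card all_cards_except_mine return_list out) := by unfold Spec_attach_with_later_cards; infer_instance

-- ===== CLAIM (what is proved, stated in full; the proofs are below) =====
def Claim_equal_attach_with_later_cards : Prop := ∀ (my_card : String) (all_cards_except_mine : List String) (return_list : List String), Dom_attach_with_later_cards my_card all_cards_except_mine return_list → Spec_attach_with_later_cards my_card all_cards_except_mine return_list (attach_with_later_cards my_card all_cards_except_mine return_list)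

-- ===== LEMMAS AND PROOFS =====

def pvFilt (cards : List String) (alive : List Bool) : List Nat :=
  (List.range cards.length).filter (fun i => alive.getD i false)

-- enumerate-based first-match search = findIdx? packaged with the element
theorem pvEnumFind (f : String → Bool) : ∀ (r : List String) (s : Int),
    (PySem.List.enumerate r s).find? (fun p => f p.2)
      = (r.findIdx? f).map (fun (j : Nat) => (s + (j : Int), r.getD j "")) := by
  intro r
  induction r with
  | nil => intro s; simp [PySem.List.enumerate]
  | cons x xs ih =>
    intro s
    rw [PySem.List.enumerate_cons, List.find?_cons, List.findIdx?_cons]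
    cases hfx : f x with
    | true => simp
    | false =>
      simp only []
      rw [ih (s + 1)]
      cases xs.findIdx? f with
      | none => simp
      | some j =>
        simp only [Option.map_some]
        congr 1
        simp
        omega

-- reading an alive mask after killing index i0
theorem pvGetDSet : ∀ (l : List Bool) (i0 i : Nat),
    (l.set i0 false).getD i false = (!(i == i0) && l.getD i false) := by
  intro l i0 i
  by_cases h : i = i0
  · subst h
    by_cases hl : i < l.length
    · simp [List.getD_eq_getElem?_getD, hl]
    · simp [List.getD_eq_getElem?_getD, List.getElem?_eq_none (by omega : l.length ≤ i),
        List.set_eq_of_length_le (by omega : l.length ≤ i)]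
  · simp [List.getD_eq_getElem?_getD, List.getElem?_set_ne (by omega : i0 ≠ i), h]

-- killing i0 in the mask = filtering i0 out of the alive index list
theorem pvFiltSet (cards : List String) (alive : List Bool) (i0 : Nat) :
    pvFilt cards (alive.set i0 false) = (pvFilt cards alive).filter (fun i => !(i == i0)) := by
  unfold pvFilt
  rw [List.filter_filter]
  apply List.filter_congr
  intro i _
  rw [pvGetDSet, Bool.and_comm]

theorem pvFiltNodup (cards : List String) (alive : List Bool) : (pvFilt cards alive).Nodup :=
  (List.nodup_range).filter _

theorem pvFilterLen (l : List Nat) (a : Nat) (h : l.Nodup) (hm : a ∈ l) :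
    (l.filter (fun i => !(i == a))).length = l.length - 1 := by
  have he := List.Nodup.erase_eq_filter h a
  have : (fun i => !(i == a)) = (fun i : Nat => i != a) := by funext i; simp [bne]
  rw [this, ← he, List.length_erase_of_mem hm]

-- the bucket of key s holds exactly the (ascending) indices whose card has prefix s
theorem pvBucketSpec (cards : List String) (plen : Int) (s : String) :
    (pvBuildBuckets cards plen).getD s []
      = (List.range cards.length).filter
          (fun i => PySem.Str.slice (cards.getD i "") none (some plen) == s) := by
  unfold pvBuildBuckets
  have hmap : (List.range cards.length).foldl
      (fun d i => d.modify (PySem.Str.slice (cards.getD i "") none (some plen)) [] (fun l => l ++ [i]))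
      PySem.Dict.empty
      = ((List.range cards.length).map
          (fun i => (PySem.Str.slice (cards.getD i "") none (some plen), i))).foldl
          (fun d p => d.modify p.1 [] (fun l => l ++ [p.2])) PySem.Dict.empty := by
    rw [List.foldl_map]
  rw [hmap, PySem.Dict.getD_foldl_modify_append, List.filter_map]
  simp [Function.comp_def]

-- the A-side scan over the alive cards, packaged: the found element and the erased list
theorem pvPick (get : Nat → String) (cond : String → Bool) : ∀ (idxs : List Nat), idxs.Nodup →
    match idxs.find? (fun i => cond (get i)) with
    | none => (idxs.map get).findIdx? cond = none
    | some i0 => ∃ j, (idxs.map get).findIdx? cond = some j ∧ (idxs.map get).getD j "" = get i0 ∧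
        ((idxs.map get).eraseIdx j) = (idxs.filter (fun i => !(i == i0))).map get := by
  intro idxs
  induction idxs with
  | nil => intro _; simp
  | cons a rest ih =>
    intro hnd
    rw [List.find?_cons]
    cases hca : cond (get a) with
    | true =>
      simp only [List.map_cons, List.findIdx?_cons, hca]
      refine ⟨0, rfl, rfl, ?_⟩
      have hnotmem : a ∉ rest := (List.nodup_cons.mp hnd).1
      have : rest.filter (fun i => !(i == a)) = rest :=
        List.filter_eq_self.mpr (fun x hx => by simp; rintro rfl; exact hnotmem hx)
      simp [this]
    | false =>
      have hpk := ih (List.nodup_cons.mp hnd).2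
      cases hrest : rest.find? (fun i => cond (get i)) with
      | none =>
        rw [hrest] at hpk
        simp [List.findIdx?_cons, hca, hpk]
      | some i0 =>
        rw [hrest] at hpk
        obtain ⟨j, hj1, hj2, hj3⟩ := hpk
        have hane : (a == i0) = false := by
          have hc0 := List.find?_some hrest
          simp only [beq_eq_false_iff_ne, ne_eq]
          rintro rfl; rw [hca] at hc0; exact Bool.false_ne_true hc0
        refine ⟨j + 1, ?_, ?_, ?_⟩
        · simp [List.findIdx?_cons, hca, hj1]
        · simpa using hj2
        · simp [List.eraseIdx_cons_succ, hane, hj3]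

theorem pvMain (cards : List String) : ∀ (rem : Nat) (alive : List Bool) (last_plen : Option Int)
    (buckets : PySem.Dict String (List Nat)) (ret : List String) (cur : String),
    alive.length = cards.length →
    rem = (pvFilt cards alive).length →
    (∀ p, last_plen = some p → buckets = pvBuildBuckets cards p) →
    pvGoB rem cur cards alive last_plen buckets ret
      = pvGoA (rem + 1) cur ((pvFilt cards alive).map (fun i => cards.getD i "")) ret := by
  intro rem
  induction rem with
  | zero =>
    intro alive lp bk ret cur h1 h2 h3
    have h0 : (pvFilt cards alive).length = 0 := h2.symm
    simp [pvGoB, pvGoA, h0]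
  | succ rem ih =>
    intro alive lp bk ret cur h1 h2 h3
    have hn0 : (pvFilt cards alive).length = rem + 1 := h2.symm
    have hbuck : (if some ((PySem.Str.len cur : Int) - 1) = lp then bk
        else pvBuildBuckets cards ((PySem.Str.len cur : Int) - 1))
        = pvBuildBuckets cards ((PySem.Str.len cur : Int) - 1) := by
      split_ifs with h
      · exact h3 _ h.symm
      · rfl
    have hsel : ((pvBuildBuckets cards ((PySem.Str.len cur : Int) - 1)).getD
          (PySem.Str.slice cur (some (-((PySem.Str.len cur : Int) - 1))) none) []).find?
          (fun i => alive.getD i false)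
        = (pvFilt cards alive).find? (fun i =>
            PySem.Str.slice cur (some (-((PySem.Str.len cur : Int) - 1))) none ==
            PySem.Str.slice (cards.getD i "") none (some ((PySem.Str.len cur : Int) - 1))) := by
      rw [pvBucketSpec, List.find?_filter]
      unfold pvFilt
      rw [List.find?_filter]
      congr 1
      funext i
      rw [decide_eq_decide, Bool.beq_comm]
      exact and_comm
    have hpk := pvPick (fun i => cards.getD i "")
      (fun c => PySem.Str.slice cur (some (-((PySem.Str.len cur : Int) - 1))) none ==
        PySem.Str.slice c none (some ((PySem.Str.len cur : Int) - 1)))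
      (pvFilt cards alive) (pvFiltNodup cards alive)
    simp only [pvGoB, hbuck, hsel]
    conv_rhs => rw [show rem + 1 + 1 = (rem + 1) + 1 from rfl]
    simp only [pvGoA, List.length_map, hn0, Nat.succ_ne_zero, if_false]
    rw [pvEnumFind (fun c => PySem.Str.slice cur (some (-((PySem.Str.len cur : Int) - 1))) none ==
        PySem.Str.slice c none (some ((PySem.Str.len cur : Int) - 1)))]
    cases hf : (pvFilt cards alive).find? (fun i =>
        PySem.Str.slice cur (some (-((PySem.Str.len cur : Int) - 1))) none ==
        PySem.Str.slice (cards.getD i "") none (some ((PySem.Str.len cur : Int) - 1))) with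
    | none =>
      rw [hf] at hpk
      rw [hpk]
      rfl
    | some i0 =>
      rw [hf] at hpk
      obtain ⟨j, hj1, hj2, hj3⟩ := hpk
      rw [hj1]
      simp only [Option.map_some, zero_add]
      rw [PySem.List.slice_to_natCast]
      rw [show ((j : Int) + 1) = (((j + 1 : Nat)) : Int) by push_cast; ring]
      rw [PySem.List.slice_from_natCast]
      rw [← List.eraseIdx_eq_take_drop_succ, hj3, hj2]
      have hmem : i0 ∈ pvFilt cards alive := List.mem_of_find?_eq_some hf
      rw [← pvFiltSet cards alive i0]
      exact ih (alive.set i0 false) (some ((PySem.Str.len cur : Int) - 1))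
        (pvBuildBuckets cards ((PySem.Str.len cur : Int) - 1)) (ret ++ [cards.getD i0 ""]) (cards.getD i0 "")
        (by simp [h1])
        (by rw [pvFiltSet, pvFilterLen _ _ (pvFiltNodup cards alive) hmem, hn0]; omega)
        (by intro p hp; injection hp with h; rw [h])

-- ===== VERDICT (by name: the statement is the Claim_ definition above) =====
theorem attach_with_later_cards_spec : Claim_equal_attach_with_later_cards := by
  intro my cards ret _
  unfold Spec_attach_with_later_cards attach_with_later_cards attach_with_later_cards_alt
  have hfilt : pvFilt cards (List.replicate cards.length true) = List.range cards.length := by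
    unfold pvFilt
    apply List.filter_eq_self.mpr
    intro a ha
    simp only [List.mem_range] at ha
    simp [List.getD_eq_getElem?_getD, ha]
  have hmapid : (List.range cards.length).map (fun i => cards.getD i "") = cards := by
    apply List.ext_getElem <;> simp [List.getD_eq_getElem?_getD]
    intro i h1 h2
    simp [List.getElem?_eq_getElem h2]
  rw [pvMain cards cards.length (List.replicate cards.length true) none PySem.Dict.empty ret my
        (by simp) (by rw [hfilt]; simp) (by intro p h; cases h)]
  rw [hfilt, hmapid]
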